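-- pv_equiv track=rewrite | github.com/sbein/Refinement | scalers.py | _get_raw_optimized_scaler_sequence
-- ===== SOURCE A (Python) =====
-- import collections
--
-- def _get_raw_optimized_scaler_sequence(feature_dict):
--
--     feature_names = list(feature_dict.keys())
--     num_total_features = len(feature_names)
--
--     current_transform_indices = {fname: 0 for fname in feature_names}
--
--     num_total_transforms_for_feature = {
--         fname: len(transforms) for fname, transforms in feature_dict.items()
--     }
--
--     active_features = set()
--     for fname in feature_names:
--         if num_total_transforms_for_feature[fname] > 0:
--             active_features.add(fname)
--
--     result_sequence = []
--
--     while active_features: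
--         pending_ops_this_step = collections.defaultdict(list)
--
--         for i, fname in enumerate(feature_names):
--             if fname in active_features:
--                 if current_transform_indices[fname] < num_total_transforms_for_feature[fname]:
--                     transform_name = feature_dict[fname][current_transform_indices[fname]]
--                     pending_ops_this_step[transform_name].append(i)
--
--         if not pending_ops_this_step:
--             break
--
--         best_transform_type = ""
--         max_covered_features = -1
--
--         sorted_transform_types = sorted(pending_ops_this_step.keys())
--
--         for transform_type in sorted_transform_types:
--             if len(pending_ops_this_step[transform_type]) > max_covered_features:
--                 max_covered_features = len(pending_ops_this_step[transform_type])
--                 best_transform_type = transform_type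
--
--         mask = [0] * num_total_features
--         features_processed_in_this_op = []
--
--         for feature_idx in pending_ops_this_step[best_transform_type]:
--             mask[feature_idx] = 1
--             fname_processed = feature_names[feature_idx]
--             features_processed_in_this_op.append(fname_processed)
--             current_transform_indices[fname_processed] += 1
--
--         result_sequence.append({best_transform_type: mask})
--
--         features_to_remove_from_active = set()
--         for fname_processed in features_processed_in_this_op:
--             if current_transform_indices[fname_processed] >= num_total_transforms_for_feature[fname_processed]:
--                 features_to_remove_from_active.add(fname_processed)
--
--         active_features.difference_update(features_to_remove_from_active)
--
--     return result_sequence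
-- ===== SOURCE B (Python) =====
-- def _get_raw_optimized_scaler_sequence(feature_dict):
--     # Incremental greedy batching: keep a transform -> pending-feature-indices map and
--     # advance only the features just processed, instead of rescanning every feature each step.
--     tss = list(feature_dict.values())
--     n = len(tss)
--     pos = [0] * n
--     groups = {}
--     for i, ts in enumerate(tss):
--         if ts:
--             groups.setdefault(ts[0], []).append(i)
--     out = []
--     while groups:
--         best, idxs = min(groups.items(), key=lambda kv: (-len(kv[1]), kv[0]))
--         del groups[best]
--         mask = [0] * n
--         for i in idxs:
--             mask[i] = 1
--             pos[i] += 1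
--             ts = tss[i]
--             if pos[i] < len(ts):
--                 groups.setdefault(ts[pos[i]], []).append(i)
--         out.append({best: mask})
--     return out
-- ===== Notes on version B (the rewrite author's own statement) =====
-- stated objective: faster
-- what changed: B maintains a transform->pending-feature-indices map that is updated incrementally (only the features just batched are advanced and regrouped, and the best transform is picked by a min over the group map) instead of rescanning every feature and rebuilding the pending dict from scratch on each greedy step.
import Mathlib
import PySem

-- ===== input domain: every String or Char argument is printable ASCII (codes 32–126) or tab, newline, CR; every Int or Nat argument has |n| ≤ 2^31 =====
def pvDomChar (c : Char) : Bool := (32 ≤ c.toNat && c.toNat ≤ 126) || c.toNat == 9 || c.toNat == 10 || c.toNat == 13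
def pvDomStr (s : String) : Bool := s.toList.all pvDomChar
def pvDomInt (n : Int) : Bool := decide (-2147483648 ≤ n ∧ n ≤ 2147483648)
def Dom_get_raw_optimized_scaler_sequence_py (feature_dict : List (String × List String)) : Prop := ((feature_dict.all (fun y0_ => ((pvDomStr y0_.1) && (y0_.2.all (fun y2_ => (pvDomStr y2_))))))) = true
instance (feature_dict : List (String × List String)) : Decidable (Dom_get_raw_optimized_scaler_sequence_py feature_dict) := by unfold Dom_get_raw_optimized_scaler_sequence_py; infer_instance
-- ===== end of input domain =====

-- B maintains a transform→pending-feature-indices map updated incrementally (only the features just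
-- batched are advanced and regrouped) instead of rescanning every feature on each greedy step.

-- ===== PORT A =====
-- while-loop of A, with fuel making the recursion structural (the loop always exits before fuel runs out)
def pyALoop (fd : PySem.Dict String (List String)) (featureNames : List String) (n : Nat)
    (ntot : PySem.Dict String Nat) :
    Nat → PySem.Dict String Nat → PySem.Set String → List (List (String × List Int)) →
    List (List (String × List Int))
  | 0, _, _, res => res
  | fuel + 1, cur, active, res =>
    if active = [] then res else
      -- pending_ops_this_step = defaultdict(list); for i, fname in enumerate(feature_names): …
      let pending : PySem.Dict String (List Nat) :=
        ((List.range n).zip featureNames).foldl (fun d p =>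
          if PySem.Set.contains active p.2 && decide (cur.getD p.2 0 < ntot.getD p.2 0) then
            match (fd.getD p.2 [])[cur.getD p.2 0]? with
            | some t => d.modify t [] (· ++ [p.1])
            | none => d            -- unreachable: the index is in range when the guard holds
          else d) PySem.Dict.empty
      if pending.items = [] then res else
        -- best_transform_type: scan sorted keys keeping the strictly larger count
        let sortedTypes := PySem.List.sorted pending.keys id
        let bm := sortedTypes.foldl (fun (bm : String × Int) t =>
          if ((pending.getD t []).length : Int) > bm.2 then (t, ((pending.getD t []).length : Int))
          else bm) ("", -1)
        let best := bm.1
        -- mask / features_processed / index bumps, one pass over pending[best]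
        let st := (pending.getD best []).foldl
          (fun (s : List Int × List String × PySem.Dict String Nat) i =>
            (s.1.set i 1, s.2.1 ++ [featureNames.getD i ""],
             s.2.2.modify (featureNames.getD i "") 0 (· + 1)))
          (List.replicate n 0, [], cur)
        let toRemove := st.2.1.foldl (fun (r : PySem.Set String) f =>
          if decide (ntot.getD f 0 ≤ st.2.2.getD f 0) then PySem.Set.add r f else r) PySem.Set.empty
        pyALoop fd featureNames n ntot fuel st.2.2 (PySem.Set.diff active toRemove)
          (res ++ [[(best, st.1)]])

def get_raw_optimized_scaler_sequence_py (feature_dict : List (String × List String)) :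
    List (List (String × List Int)) :=
  let fd := PySem.Dict.mk feature_dict
  let featureNames := fd.keys
  let n := featureNames.length
  let cur := featureNames.foldl (fun d f => d.insert f 0) PySem.Dict.empty
  let ntot := feature_dict.foldl (fun d p => d.insert p.1 p.2.length) PySem.Dict.empty
  let active := featureNames.foldl (fun s f =>
    if decide (0 < ntot.getD f 0) then PySem.Set.add s f else s) PySem.Set.empty
  let fuel := feature_dict.foldl (fun a p => a + p.2.length) 0 + 1
  pyALoop fd featureNames n ntot fuel cur active []

-- ===== PORT B =====
-- min(groups.items(), key=lambda kv: (-len(kv[1]), kv[0])): first (here unique) lex-minimal item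
def pyBMin (items : List (String × List Nat)) : String × List Nat :=
  match items with
  | [] => ("", [])                 -- unreachable: the loop runs only while groups is nonempty
  | x :: xs => xs.foldl (fun b y =>
      if b.2.length < y.2.length ∨ (y.2.length = b.2.length ∧ y.1 < b.1) then y else b) x

def pyBLoop (tss : List (List String)) (n : Nat) :
    Nat → List Nat → PySem.Dict String (List Nat) → List (List (String × List Int)) →
    List (List (String × List Int))
  | 0, _, _, out => out
  | fuel + 1, pos, groups, out =>
    if groups.items = [] then out else
      let bi := pyBMin groups.items
      let best := bi.1
      let idxs := bi.2
      let groups1 := groups.erase best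
      -- for i in idxs: mask[i]=1; pos[i]+=1; regroup i under its next transform (if any)
      let st := idxs.foldl
        (fun (s : List Int × List Nat × PySem.Dict String (List Nat)) i =>
          (s.1.set i 1, s.2.1.set i (s.2.1.getD i 0 + 1),
           if s.2.1.getD i 0 + 1 < (tss.getD i []).length
           then s.2.2.modify ((tss.getD i []).getD (s.2.1.getD i 0 + 1) "") [] (· ++ [i])
           else s.2.2))
        (List.replicate n 0, pos, groups1)
      pyBLoop tss n fuel st.2.1 st.2.2 (out ++ [[(best, st.1)]])

def get_raw_optimized_scaler_sequence_py_alt (feature_dict : List (String × List String)) :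
    List (List (String × List Int)) :=
  let tss := feature_dict.map (·.2)
  let n := tss.length
  let pos := List.replicate n 0
  let groups := ((List.range n).zip tss).foldl (fun d p =>
    match p.2 with
    | [] => d
    | t :: _ => d.modify t [] (· ++ [p.1])) PySem.Dict.empty
  let fuel := tss.foldl (fun a t => a + t.length) 0 + 1
  pyBLoop tss n fuel pos groups []

-- ===== PRECONDITION & SPEC =====
-- Pre_ excludes association lists with duplicate keys: the Python argument is a dict, which cannot
-- represent them (a duplicated key collapses), so the encoding is ambiguous there.
def Pre_get_raw_optimized_scaler_sequence_py (feature_dict : List (String × List String)) : Prop :=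
  (feature_dict.map (·.1)).Nodup
instance (feature_dict : List (String × List String)) : Decidable (Pre_get_raw_optimized_scaler_sequence_py feature_dict) := by unfold Pre_get_raw_optimized_scaler_sequence_py; infer_instance

def pvWitness_get_raw_optimized_scaler_sequence_py : (List (String × List String)) :=
  [("a", ["log", "std"]), ("b", ["std"]), ("c", ["log", "std"])]

def Spec_get_raw_optimized_scaler_sequence_py (feature_dict : List (String × List String)) (out : List (List (String × List Int))) : Prop := out = get_raw_optimized_scaler_sequence_py_alt feature_dict
instance (feature_dict : List (String × List String)) (out : List (List (String × List Int))) : Decidable (Spec_get_raw_optimized_scaler_sequence_py feature_dict out) := by unfold Spec_get_raw_optimized_scaler_sequence_py; infer_instance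

-- ===== CLAIM (what is proved, stated in full; the proofs are below) =====
def Claim_equal_get_raw_optimized_scaler_sequence_py : Prop := ∀ (feature_dict : List (String × List String)), Dom_get_raw_optimized_scaler_sequence_py feature_dict → Pre_get_raw_optimized_scaler_sequence_py feature_dict → Spec_get_raw_optimized_scaler_sequence_py feature_dict (get_raw_optimized_scaler_sequence_py feature_dict)

-- ===== LEMMAS AND PROOFS =====

-- canonical views of the evolving state
def pvTss (fd : List (String × List String)) : List (List String) := fd.map (·.2)
def pvNames (fd : List (String × List String)) : List String := fd.map (·.1)
def pvHead? (fd : List (String × List String)) (pos : List Nat) (i : Nat) : Option String :=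
  ((pvTss fd).getD i [])[pos.getD i 0]?
def pvLive (fd : List (String × List String)) (pos : List Nat) (i : Nat) : Prop :=
  pos.getD i 0 < ((pvTss fd).getD i []).length

-- A-side invariant: cur mirrors pos at each feature name; active is exactly the live names
def pvInvA (fd : List (String × List String)) (pos : List Nat)
    (cur : PySem.Dict String Nat) (active : PySem.Set String) : Prop :=
  (∀ i, i < fd.length → cur.getD ((pvNames fd).getD i "") 0 = pos.getD i 0) ∧
  (∀ s, s ∈ active ↔ ∃ i, i < fd.length ∧ s = (pvNames fd).getD i "" ∧ pvLive fd pos i)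

-- B-side invariant: groups holds, per transform, exactly the live features whose next transform it is
def pvInvB (fd : List (String × List String)) (pos : List Nat)
    (groups : PySem.Dict String (List Nat)) : Prop :=
  (∀ t i, i ∈ groups.getD t [] ↔ i < fd.length ∧ pvHead? fd pos i = some t) ∧
  (∀ t, (groups.getD t []).Nodup) ∧
  (∀ t, groups.contains t = true → groups.getD t [] ≠ []) ∧
  groups.keys.Nodup

-- generic fold shapes
lemma pvFoldlAppendEqMap {α β : Type} (f : α → β) (l : List α) (acc : List β) :
    l.foldl (fun a x => a ++ [f x]) acc = acc ++ l.map f := by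
  induction l generalizing acc with
  | nil => simp
  | cons x t ih => simp [ih]

lemma pvFoldlMatch {α κ β : Type} [BEq κ] (F : α → Option κ) (v : α → β)
    (l : List α) (d : PySem.Dict κ (List β)) :
    l.foldl (fun d x => (F x).elim d (fun t => d.modify t [] (· ++ [v x]))) d
    = (l.filterMap (fun x => (F x).map (fun t => (t, v x)))).foldl
        (fun d p => d.modify p.1 [] (· ++ [p.2])) d := by
  induction l generalizing d with
  | nil => rfl
  | cons x t ih => cases h : F x <;> simp [h, ih]

lemma pvScatterGetD (l : List Nat) (m : List Int) (j : Nat) :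
    (l.foldl (fun m i => m.set i 1) m).getD j 0
      = if j ∈ l ∧ j < m.length then 1 else m.getD j 0 := by
  induction l generalizing m with
  | nil => simp
  | cons i t ih =>
    simp only [List.foldl_cons, ih, List.length_set]
    by_cases hjt : j ∈ t
    · by_cases hjl : j < m.length <;> simp [hjt, hjl, List.getD_eq_getElem?_getD, List.getElem?_set]
    · by_cases hji : j = i
      · subst hji
        by_cases hjl : j < m.length <;>
          simp [hjt, hjl, List.getD_eq_getElem?_getD, List.getElem?_set]
      · simp [hjt, hji, List.getD_eq_getElem?_getD, List.getElem?_set, Ne.symm hji]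

lemma pvScatterLen (l : List Nat) (m : List Int) :
    (l.foldl (fun m i => m.set i 1) m).length = m.length := by
  induction l generalizing m with
  | nil => rfl
  | cons i t ih => simp [ih]

lemma pvFoldAddMem (l : List String) (c : String → Bool) (r : PySem.Set String) (s : String) :
    s ∈ l.foldl (fun r f => if c f then PySem.Set.add r f else r) r
      ↔ s ∈ r ∨ (s ∈ l ∧ c s = true) := by
  induction l generalizing r with
  | nil => simp
  | cons x t ih =>
    simp only [List.foldl_cons, List.mem_cons]
    by_cases hc : c x
    · rw [if_pos hc, ih]
      simp only [PySem.Set.mem_add]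
      constructor
      · rintro ((h | h) | ⟨h1, h2⟩)
        · exact Or.inl h
        · exact Or.inr ⟨Or.inl h, h ▸ hc⟩
        · exact Or.inr ⟨Or.inr h1, h2⟩
      · rintro (h | ⟨h | h, h2⟩)
        · exact Or.inl (Or.inl h)
        · exact Or.inl (Or.inr h)
        · exact Or.inr ⟨h, h2⟩
    · rw [if_neg hc, ih]
      constructor
      · rintro (h | ⟨h1, h2⟩)
        · exact Or.inl h
        · exact Or.inr ⟨Or.inr h1, h2⟩
      · rintro (h | ⟨h | h, h2⟩)
        · exact Or.inl h
        · exact absurd (h ▸ h2) hc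
        · exact Or.inr ⟨h, h2⟩

lemma pvFind?Filter {α : Type} (q r : α → Bool) (l : List α) (h : ∀ x, q x = true → r x = true) :
    (l.filter r).find? q = l.find? q := by
  induction l with
  | nil => rfl
  | cons x t ih =>
    by_cases hq : q x
    · have := h x hq; simp [List.filter_cons, this, List.find?_cons, hq]
    · by_cases hr : r x <;> simp [List.filter_cons, hr, List.find?_cons, hq, ih]

lemma pvGet?Erase {ν : Type} (d : PySem.Dict String ν) (k k' : String) :
    (d.erase k).get? k' = if k' = k then none else d.get? k' := by
  show Option.map _ (List.find? _ (List.filter _ d.items)) = _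
  by_cases h : k' = k
  · subst h
    rw [List.find?_eq_none.2]
    · simp
    · intro p hp
      have := (List.mem_filter.1 hp).2
      simp only [Bool.not_eq_eq_eq_not, Bool.not_true, beq_eq_false_iff_ne] at this
      simpa using this
  · rw [pvFind?Filter]
    · simp [PySem.Dict.get?, h]
    · intro p hp
      simp only [beq_iff_eq] at hp
      simp [hp, h]

lemma pvGetDErase {ν : Type} (d : PySem.Dict String ν) (k k' : String) (d0 : ν) :
    (d.erase k).getD k' d0 = if k' = k then d0 else d.getD k' d0 := by
  simp only [PySem.Dict.getD, pvGet?Erase]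
  by_cases h : k' = k <;> simp [h]

lemma pvContainsErase {ν : Type} (d : PySem.Dict String ν) (k k' : String) :
    (d.erase k).contains k' = if k' = k then false else d.contains k' := by
  rw [PySem.Dict.contains_eq_isSome_get?, PySem.Dict.contains_eq_isSome_get?, pvGet?Erase]
  by_cases h : k' = k <;> simp [h]

lemma pvKeysErase {ν : Type} (d : PySem.Dict String ν) (k : String) :
    (d.erase k).keys = d.keys.filter (fun x => !(x == k)) := by
  show (List.filter _ d.items).map _ = (d.items.map _).filter _
  rw [List.filter_map]
  rfl

-- Python min(…, key) as a fold over a linear order: the result is a key-minimum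
lemma pvFoldMin {α κ : Type} [LinearOrder κ] (key : α → κ) (l : List α) (x : α) :
    (l.foldl (fun b y => if key y < key b then y else b) x) ∈ x :: l ∧
    ∀ z ∈ x :: l, ¬ key z < key (l.foldl (fun b y => if key y < key b then y else b) x) := by
  induction l generalizing x with
  | nil =>
    refine ⟨List.mem_cons_self .., ?_⟩
    intro z hz
    simp only [List.mem_singleton] at hz
    subst hz
    exact lt_irrefl _
  | cons a t ih =>
    have hstep : (a :: t).foldl (fun b y => if key y < key b then y else b) x
        = t.foldl (fun b y => if key y < key b then y else b) (if key a < key x then a else x) := rfl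
    by_cases hc : key a < key x
    · rw [hstep, if_pos hc]
      obtain ⟨h1, h2⟩ := ih a
      refine ⟨List.mem_cons_of_mem _ h1, ?_⟩
      intro w hw
      rcases List.mem_cons.1 hw with h | hw
      · subst h
        exact fun hx => h2 a (List.mem_cons_self ..) (lt_trans hc hx)
      · exact h2 _ hw
    · rw [hstep, if_neg hc]
      obtain ⟨h1, h2⟩ := ih x
      constructor
      · rcases List.mem_cons.1 h1 with h | h
        · rw [h]; exact List.mem_cons_self ..
        · exact List.mem_cons_of_mem _ (List.mem_cons_of_mem _ h)
      · intro w hw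
        rcases List.mem_cons.1 hw with h | hw
        · subst h; exact h2 _ (List.mem_cons_self ..)
        rcases List.mem_cons.1 hw with h | hw
        · subst h
          exact fun hy => h2 x (List.mem_cons_self ..) (lt_of_le_of_lt (not_lt.1 hc) hy)
        · exact h2 _ (List.mem_cons_of_mem _ hw)

-- A's strictly-greater scan over a strictly sorted list picks the least key of maximal count
lemma pvFoldArgmax (cnt : String → Int) (l : List String) (b0 : String) :
    List.Pairwise (· < ·) (b0 :: l) →
    (l.foldl (fun bm t => if cnt t > bm.2 then (t, cnt t) else bm) (b0, cnt b0)).2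
      = cnt (l.foldl (fun bm t => if cnt t > bm.2 then (t, cnt t) else bm) (b0, cnt b0)).1 ∧
    (l.foldl (fun bm t => if cnt t > bm.2 then (t, cnt t) else bm) (b0, cnt b0)).1 ∈ b0 :: l ∧
    ∀ u ∈ b0 :: l,
      cnt u < cnt (l.foldl (fun bm t => if cnt t > bm.2 then (t, cnt t) else bm) (b0, cnt b0)).1 ∨
      (cnt u = cnt (l.foldl (fun bm t => if cnt t > bm.2 then (t, cnt t) else bm) (b0, cnt b0)).1 ∧
        (l.foldl (fun bm t => if cnt t > bm.2 then (t, cnt t) else bm) (b0, cnt b0)).1 ≤ u) := by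
  induction l generalizing b0 with
  | nil =>
    intro _
    refine ⟨rfl, by simp, ?_⟩
    intro u hu
    simp only [List.mem_singleton] at hu
    subst hu
    exact Or.inr ⟨rfl, le_refl _⟩
  | cons t rest ih =>
    intro hpw
    have hb0t : b0 < t := (List.pairwise_cons.1 hpw).1 _ (List.mem_cons_self ..)
    have hstep : ∀ z : String,
        ((t :: rest).foldl (fun bm t => if cnt t > bm.2 then (t, cnt t) else bm) (b0, cnt b0))
        = rest.foldl (fun bm t => if cnt t > bm.2 then (t, cnt t) else bm)
            (if cnt t > cnt b0 then (t, cnt t) else (b0, cnt b0)) := fun _ => rfl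
    by_cases hc : cnt t > cnt b0
    · have hpw' : List.Pairwise (· < ·) (t :: rest) := (List.pairwise_cons.1 hpw).2
      obtain ⟨e1, e2, e3⟩ := ih t hpw'
      rw [hstep b0]
      simp only [hc, if_pos]
      refine ⟨e1, ?_, ?_⟩
      · rcases List.mem_cons.1 e2 with h | h
        · simp [h]
        · simp [List.mem_cons_of_mem, h]
      · intro u hu
        rcases List.mem_cons.1 hu with rfl | hu
        · -- u = b0 : strictly beaten by t, which is ≤ the final best's count
          rcases e3 t (List.mem_cons_self ..) with h | ⟨h, _⟩
          · exact Or.inl (lt_trans hc h)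
          · exact Or.inl (h ▸ hc)
        · exact e3 u hu
    · have hpw' : List.Pairwise (· < ·) (b0 :: rest) := by
        rw [List.pairwise_cons] at hpw ⊢
        exact ⟨fun a ha => hpw.1 a (List.mem_cons_of_mem _ ha),
          (List.pairwise_cons.1 hpw.2).2⟩
      obtain ⟨e1, e2, e3⟩ := ih b0 hpw'
      rw [hstep b0]
      simp only [hc, if_neg]
      refine ⟨e1, ?_, ?_⟩
      · rcases List.mem_cons.1 e2 with h | h
        · simp [h]
        · simp [List.mem_cons_of_mem, h]
      · intro u hu
        rcases List.mem_cons.1 hu with rfl | hu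
        · exact e3 u (List.mem_cons_self ..)
        rcases List.mem_cons.1 hu with rfl | hu
        · -- u = t with cnt t ≤ cnt b0
          push_neg at hc
          rcases e3 b0 (List.mem_cons_self ..) with h | ⟨h, hle⟩
          · exact Or.inl (lt_of_le_of_lt hc h)
          · rcases lt_or_eq_of_le hc with h' | h'
            · exact Or.inl (h ▸ h')
            · exact Or.inr ⟨h'.trans h, le_trans hle (le_of_lt hb0t)⟩
        · exact e3 u (List.mem_cons_of_mem _ hu)

-- canonical pending structure at a given pos
def pvPend (fd : List (String × List String)) (pos : List Nat) : List (String × Nat) :=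
  (List.range fd.length).filterMap (fun i => (pvHead? fd pos i).map (fun t => (t, i)))
def pvIdx (fd : List (String × List String)) (pos : List Nat) (t : String) : List Nat :=
  (List.range fd.length).filter (fun i => pvHead? fd pos i == some t)

lemma pvP1 (fd : List (String × List String)) (pos : List Nat) (t : String) :
    ((pvPend fd pos).filter (fun p => p.1 == t)).map (·.2) = pvIdx fd pos t := by
  show ((List.filterMap _ _).filter _).map _ = List.filter _ _
  generalize (List.range fd.length) = l
  induction l with
  | nil => rfl
  | cons i r ih =>
    cases h : pvHead? fd pos i with
    | none => simp [List.filterMap_cons, h, List.filter_cons, ih]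
    | some u =>
      by_cases ht : u = t
      · subst ht
        simp [List.filterMap_cons, h, List.filter_cons, ih]
      · simp [List.filterMap_cons, h, List.filter_cons, ht, ih]

lemma pvP2 (fd : List (String × List String)) (pos : List Nat) (t : String) (i : Nat) :
    i ∈ pvIdx fd pos t ↔ i < fd.length ∧ pvHead? fd pos i = some t := by
  simp [pvIdx, List.mem_filter, List.mem_range]

lemma pvP3 (fd : List (String × List String)) (pos : List Nat) (t : String) :
    (pvIdx fd pos t).Nodup := (List.nodup_range).filter _

lemma pvP4 (fd : List (String × List String)) (pos : List Nat) (t : String) :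
    t ∈ (pvPend fd pos).map (·.1) ↔ ∃ i, i < fd.length ∧ pvHead? fd pos i = some t := by
  simp only [pvPend, List.map_filterMap, List.mem_filterMap, List.mem_range]
  constructor
  · rintro ⟨i, hi, hmap⟩
    cases h : pvHead? fd pos i with
    | none => rw [h] at hmap; simp at hmap
    | some u =>
      rw [h] at hmap
      simp only [Option.map_map, Option.map_some] at hmap
      exact ⟨i, hi, by rw [h, ← hmap]⟩
  · rintro ⟨i, hi, h⟩
    exact ⟨i, hi, by rw [h]; rfl⟩

lemma pvNamesInj (fd : List (String × List String)) (hnd : (pvNames fd).Nodup)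
    (i j : Nat) (hi : i < fd.length) (hj : j < fd.length)
    (h : (pvNames fd).getD i "" = (pvNames fd).getD j "") : i = j := by
  have hi' : i < (pvNames fd).length := by simpa [pvNames] using hi
  have hj' : j < (pvNames fd).length := by simpa [pvNames] using hj
  rw [List.getD_eq_getElem _ _ hi', List.getD_eq_getElem _ _ hj'] at h
  exact hnd.getElem_inj_iff.mp h

lemma pvMkGetD (fd : List (String × List String)) (hnd : (pvNames fd).Nodup)
    (i : Nat) (hi : i < fd.length) :
    (PySem.Dict.mk fd).getD ((pvNames fd).getD i "") [] = (pvTss fd).getD i [] := by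
  have hi1 : i < (pvNames fd).length := by simpa [pvNames] using hi
  have hi2 : i < (pvTss fd).length := by simpa [pvTss] using hi
  rw [List.getD_eq_getElem _ _ hi1, List.getD_eq_getElem _ _ hi2]
  have hmem : ((pvNames fd)[i], (pvTss fd)[i]) ∈ (PySem.Dict.mk fd).items := by
    show _ ∈ fd
    have : fd[i] = ((pvNames fd)[i], (pvTss fd)[i]) := by
      simp [pvNames, pvTss, List.getElem_map]
    rw [← this]
    exact List.getElem_mem _
  have := PySem.Dict.get?_of_mem_items _ hmem hnd
  simp [PySem.Dict.getD, this]

lemma pvZipRange {α : Type} (d : α) (ns : List α) :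
    (List.range ns.length).zip ns = (List.range ns.length).map (fun i => (i, ns.getD i d)) := by
  apply List.ext_getElem
  · simp
  · intro k h1 h2
    have hk : k < ns.length := by simpa using h2
    simp [List.getElem_zip, List.getElem_range, List.getElem_map, List.getElem?_eq_getElem hk]


-- the dict built by folding modify-append over the canonical pending list
lemma pvPendDictGetD (fd : List (String × List String)) (pos : List Nat) (t : String) :
    ((pvPend fd pos).foldl (fun d p => d.modify p.1 [] (· ++ [p.2]))
        (PySem.Dict.empty : PySem.Dict String (List Nat))).getD t [] = pvIdx fd pos t := by
  rw [PySem.Dict.getD_foldl_modify_append]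
  rw [PySem.Dict.getD_empty]
  simpa using pvP1 fd pos t

lemma pvPendDictKeys (fd : List (String × List String)) (pos : List Nat) :
    ((pvPend fd pos).foldl (fun d p => d.modify p.1 [] (· ++ [p.2]))
        (PySem.Dict.empty : PySem.Dict String (List Nat))).keys
      = PySem.Set.ofList ((pvPend fd pos).map (·.1)) := by
  have := PySem.Dict.keys_foldl_modify_key (pvPend fd pos) (·.1) []
    (fun _ p => (· ++ [p.2])) (PySem.Dict.empty : PySem.Dict String (List Nat))
  simpa [PySem.Dict.keys_empty, PySem.Set.update_nil_left] using this

-- the pending dict the two ports build is the canonical one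
lemma pvInvBOfPendDict (fd : List (String × List String)) (pos : List Nat) :
    pvInvB fd pos ((pvPend fd pos).foldl (fun d p => d.modify p.1 [] (· ++ [p.2]))
      (PySem.Dict.empty : PySem.Dict String (List Nat))) := by
  refine ⟨?_, ?_, ?_, ?_⟩
  · intro t i
    rw [pvPendDictGetD]
    exact pvP2 fd pos t i
  · intro t
    rw [pvPendDictGetD]
    exact pvP3 fd pos t
  · intro t hc
    rw [PySem.Dict.contains_iff_mem_keys, pvPendDictKeys, PySem.Set.mem_ofList, pvP4] at hc
    obtain ⟨i, hi, hh⟩ := hc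
    rw [pvPendDictGetD]
    exact List.ne_nil_of_mem ((pvP2 fd pos t i).2 ⟨hi, hh⟩)
  · rw [pvPendDictKeys]
    exact PySem.Set.nodup_ofList _

-- A's per-step pending fold computes the canonical pending dict
lemma pvPendingAEq (fd : List (String × List String)) (hnd : (pvNames fd).Nodup)
    (pos : List Nat) (cur : PySem.Dict String Nat) (active : PySem.Set String)
    (ntot : PySem.Dict String Nat)
    (hnt : ∀ i, i < fd.length → ntot.getD ((pvNames fd).getD i "") 0 = ((pvTss fd).getD i []).length)
    (hA : pvInvA fd pos cur active) :
    ((List.range fd.length).zip (pvNames fd)).foldl (fun d p =>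
        if PySem.Set.contains active p.2 && decide (cur.getD p.2 0 < ntot.getD p.2 0) then
          match ((PySem.Dict.mk fd).getD p.2 [])[cur.getD p.2 0]? with
          | some t => d.modify t [] (· ++ [p.1])
          | none => d
        else d) PySem.Dict.empty
    = (pvPend fd pos).foldl (fun d p => d.modify p.1 [] (· ++ [p.2])) PySem.Dict.empty := by
  have hlen : (pvNames fd).length = fd.length := by simp [pvNames]
  conv_lhs => rw [show fd.length = (pvNames fd).length from hlen.symm]
  rw [pvZipRange "" (pvNames fd), List.foldl_map]
  rw [PySem.List.foldl_congr_mem _ _ (fun d i =>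
      (pvHead? fd pos i).elim d (fun t => d.modify t [] (· ++ [i]))) _ ?hcong]
  case hcong =>
    intro d i hi
    rw [List.mem_range, hlen] at hi
    by_cases hl : pvLive fd pos i
    · have hmem : ((pvNames fd).getD i "") ∈ active := by
        exact (hA.2 _).2 ⟨i, hi, rfl, hl⟩
      have hcontains : PySem.Set.contains active ((pvNames fd).getD i "") = true :=
        (PySem.Set.contains_iff _ _).2 hmem
      have hlt : cur.getD ((pvNames fd).getD i "") 0 < ntot.getD ((pvNames fd).getD i "") 0 := by
        rw [hA.1 i hi, hnt i hi]; exact hl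
      have hscrut : ((PySem.Dict.mk fd).getD ((pvNames fd).getD i "") [])[cur.getD ((pvNames fd).getD i "") 0]?
          = pvHead? fd pos i := by
        rw [pvMkGetD fd hnd i hi, hA.1 i hi]; rfl
      rw [hscrut] at *
      simp only [hcontains, hlt, decide_true, Bool.and_self, if_pos]
      cases h : pvHead? fd pos i <;> simp [h]
    · have hcontains : PySem.Set.contains active ((pvNames fd).getD i "") = false := by
        rw [Bool.eq_false_iff]
        intro hcon
        obtain ⟨j, hj, hej, hlj⟩ := (hA.2 _).1 ((PySem.Set.contains_iff _ _).1 hcon)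
        exact hl ((pvNamesInj fd hnd i j hi hj hej) ▸ hlj)
      have hnone : pvHead? fd pos i = none := by
        unfold pvHead? pvLive at *
        exact List.getElem?_eq_none (not_lt.1 hl)
      have hcond : (PySem.Set.contains active ((pvNames fd).getD i "") &&
          decide (cur.getD ((pvNames fd).getD i "") 0 < ntot.getD ((pvNames fd).getD i "") 0)) = false := by
        rw [hcontains]; rfl
      rw [if_neg (by rw [hcond]; exact Bool.false_ne_true)]
      simp [hnone]
  · rw [pvFoldlMatch (fun i => pvHead? fd pos i) (fun i => i)]
    unfold pvPend
    rw [hlen]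

-- B's initial grouping fold computes the canonical pending dict at pos₀
lemma pvGroupsInitEq (fd : List (String × List String)) :
    ((List.range (pvTss fd).length).zip (pvTss fd)).foldl (fun d p =>
        match p.2 with
        | [] => d
        | t :: _ => d.modify t [] (· ++ [p.1])) PySem.Dict.empty
    = (pvPend fd (List.replicate fd.length 0)).foldl
        (fun d p => d.modify p.1 [] (· ++ [p.2])) PySem.Dict.empty := by
  have hlen : (pvTss fd).length = fd.length := by simp [pvTss]
  rw [pvZipRange [] (pvTss fd), List.foldl_map]
  rw [PySem.List.foldl_congr_mem _ _ (fun d i =>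
      (pvHead? fd (List.replicate fd.length 0) i).elim d (fun t => d.modify t [] (· ++ [i]))) _ ?hcong]
  case hcong =>
    intro d i _
    have hpos : (List.replicate fd.length (0 : Nat)).getD i 0 = 0 := by
      rw [List.getD_eq_getElem?_getD, List.getElem?_replicate]
      split <;> simp
    cases h : (pvTss fd).getD i [] with
    | nil =>
      have : pvHead? fd (List.replicate fd.length 0) i = none := by
        unfold pvHead?; rw [hpos, h]; rfl
      simp [this]
    | cons t r =>
      have : pvHead? fd (List.replicate fd.length 0) i = some t := by
        unfold pvHead?; rw [hpos, h]; rfl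
      simp [this]
  · rw [pvFoldlMatch (fun i => pvHead? fd (List.replicate fd.length 0) i) (fun i => i)]
    unfold pvPend
    rw [hlen]

-- B's inner regrouping fold: pointwise pos bumps plus per-transform appends of the regrouped features
lemma pvBInnerPG (tss : List (List String)) (l : List Nat) :
    ∀ (p0 : List Nat) (g0 : PySem.Dict String (List Nat)), l.Nodup → (∀ i ∈ l, i < p0.length) →
    ((l.foldl (fun (s : List Nat × PySem.Dict String (List Nat)) i =>
        (s.1.set i (s.1.getD i 0 + 1),
         if s.1.getD i 0 + 1 < (tss.getD i []).length
         then s.2.modify ((tss.getD i []).getD (s.1.getD i 0 + 1) "") [] (· ++ [i])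
         else s.2)) (p0, g0)).1.length = p0.length) ∧
    (∀ j, (l.foldl (fun (s : List Nat × PySem.Dict String (List Nat)) i =>
        (s.1.set i (s.1.getD i 0 + 1),
         if s.1.getD i 0 + 1 < (tss.getD i []).length
         then s.2.modify ((tss.getD i []).getD (s.1.getD i 0 + 1) "") [] (· ++ [i])
         else s.2)) (p0, g0)).1.getD j 0
      = if j ∈ l then p0.getD j 0 + 1 else p0.getD j 0) ∧
    (∀ t, (l.foldl (fun (s : List Nat × PySem.Dict String (List Nat)) i =>
        (s.1.set i (s.1.getD i 0 + 1),
         if s.1.getD i 0 + 1 < (tss.getD i []).length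
         then s.2.modify ((tss.getD i []).getD (s.1.getD i 0 + 1) "") [] (· ++ [i])
         else s.2)) (p0, g0)).2.getD t []
      = g0.getD t [] ++ l.filter (fun i => (tss.getD i [])[p0.getD i 0 + 1]? == some t)) ∧
    (g0.keys.Nodup → (l.foldl (fun (s : List Nat × PySem.Dict String (List Nat)) i =>
        (s.1.set i (s.1.getD i 0 + 1),
         if s.1.getD i 0 + 1 < (tss.getD i []).length
         then s.2.modify ((tss.getD i []).getD (s.1.getD i 0 + 1) "") [] (· ++ [i])
         else s.2)) (p0, g0)).2.keys.Nodup) ∧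
    ((∀ t, g0.contains t = true → g0.getD t [] ≠ []) →
      ∀ t, (l.foldl (fun (s : List Nat × PySem.Dict String (List Nat)) i =>
        (s.1.set i (s.1.getD i 0 + 1),
         if s.1.getD i 0 + 1 < (tss.getD i []).length
         then s.2.modify ((tss.getD i []).getD (s.1.getD i 0 + 1) "") [] (· ++ [i])
         else s.2)) (p0, g0)).2.contains t = true →
        (l.foldl (fun (s : List Nat × PySem.Dict String (List Nat)) i =>
        (s.1.set i (s.1.getD i 0 + 1),
         if s.1.getD i 0 + 1 < (tss.getD i []).length
         then s.2.modify ((tss.getD i []).getD (s.1.getD i 0 + 1) "") [] (· ++ [i])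
         else s.2)) (p0, g0)).2.getD t [] ≠ []) := by
  induction l with
  | nil =>
    intro p0 g0 _ _
    exact ⟨rfl, by intro j; simp, by intro t; simp, fun h => h, fun h => h⟩
  | cons i rest ih =>
    intro p0 g0 hnd hlt
    have hi : i < p0.length := hlt i (List.mem_cons_self ..)
    have hirest : i ∉ rest := (List.nodup_cons.1 hnd).1
    have hndr : rest.Nodup := (List.nodup_cons.1 hnd).2
    -- the state after processing i
    set p1 := p0.set i (p0.getD i 0 + 1) with hp1
    set g1 := (if p0.getD i 0 + 1 < (tss.getD i []).length
        then g0.modify ((tss.getD i []).getD (p0.getD i 0 + 1) "") [] (· ++ [i])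
        else g0) with hg1
    have hstep : ((i :: rest).foldl (fun (s : List Nat × PySem.Dict String (List Nat)) i =>
        (s.1.set i (s.1.getD i 0 + 1),
         if s.1.getD i 0 + 1 < (tss.getD i []).length
         then s.2.modify ((tss.getD i []).getD (s.1.getD i 0 + 1) "") [] (· ++ [i])
         else s.2)) (p0, g0))
      = (rest.foldl (fun (s : List Nat × PySem.Dict String (List Nat)) i =>
        (s.1.set i (s.1.getD i 0 + 1),
         if s.1.getD i 0 + 1 < (tss.getD i []).length
         then s.2.modify ((tss.getD i []).getD (s.1.getD i 0 + 1) "") [] (· ++ [i])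
         else s.2)) (p1, g1)) := rfl
    have hlt1 : ∀ j ∈ rest, j < p1.length := by
      intro j hj
      rw [hp1, List.length_set]
      exact hlt j (List.mem_cons_of_mem _ hj)
    have hp1get : ∀ j, j ≠ i → p1.getD j 0 = p0.getD j 0 := by
      intro j hj
      rw [hp1, List.getD_eq_getElem?_getD, List.getD_eq_getElem?_getD,
        List.getElem?_set_ne (fun h => hj h.symm)]
      rfl
    have hi' : i < p1.length := by rw [hp1, List.length_set]; exact hi
    have hp1geti : p1.getD i 0 = p0.getD i 0 + 1 := by
      rw [hp1, List.getD_eq_getElem?_getD, List.getElem?_set_self', List.getElem?_eq_getElem hi]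
      rfl
    obtain ⟨c0, c1, c2, c3, c4⟩ := ih p1 g1 hndr hlt1
    rw [hstep]
    refine ⟨by rw [c0, hp1, List.length_set], ?_, ?_, ?_, ?_⟩
    · -- pos component
      intro j
      rw [c1 j]
      by_cases hjr : j ∈ rest
      · rw [if_pos hjr, if_pos (List.mem_cons_of_mem _ hjr),
          hp1get j (fun h => hirest (by rw [← h]; exact hjr))]
      · by_cases hji : j = i
        · subst hji
          rw [if_neg hjr, if_pos (List.mem_cons_self ..), hp1geti]
        · have hnm : j ∉ (i :: rest) := by
            intro h
            rcases List.mem_cons.1 h with h | h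
            · exact hji h
            · exact hjr h
          rw [if_neg hjr, if_neg hnm, hp1get j hji]
    · -- groups component
      intro t
      rw [c2 t]
      have hfc : rest.filter (fun i' => (tss.getD i' [])[p1.getD i' 0 + 1]? == some t)
          = rest.filter (fun i' => (tss.getD i' [])[p0.getD i' 0 + 1]? == some t) := by
        apply List.filter_congr
        intro j hj
        rw [hp1get j (fun h => hirest (by rw [← h]; exact hj))]
      rw [hfc]
      by_cases hc : p0.getD i 0 + 1 < (tss.getD i []).length
      · have hsome : (tss.getD i [])[p0.getD i 0 + 1]?
            = some ((tss.getD i []).getD (p0.getD i 0 + 1) "") := by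
          rw [List.getElem?_eq_getElem hc, List.getD_eq_getElem _ _ hc]
        rw [hg1, if_pos hc]
        by_cases ht : t = (tss.getD i []).getD (p0.getD i 0 + 1) ""
        · subst ht
          rw [PySem.Dict.getD_modify_self,
            List.filter_cons_of_pos (by simp only [hsome, beq_self_eq_true])]
          simp
        · rw [PySem.Dict.getD_modify_of_ne _ _ _ ht,
            List.filter_cons_of_neg (by
              simp only [hsome]
              intro hcontra
              exact ht (Option.some.inj (eq_of_beq hcontra)).symm)]
      · have hnone : (tss.getD i [])[p0.getD i 0 + 1]? = none :=
          List.getElem?_eq_none (not_lt.1 hc)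
        rw [hg1, if_neg hc, List.filter_cons_of_neg (by
          simp only [hnone]
          intro hcontra
          exact absurd (eq_of_beq hcontra) (by simp))]
    · -- keys stay Nodup
      intro hk
      apply c3
      rw [hg1]
      by_cases hc : p0.getD i 0 + 1 < (tss.getD i []).length
      · rw [if_pos hc, PySem.Dict.keys_modify]
        by_cases hcon : g0.contains ((tss.getD i []).getD (p0.getD i 0 + 1) "") = true
        · rw [PySem.Dict.keys_insert_of_contains _ _ hcon]
          exact hk
        · rw [PySem.Dict.keys_insert_of_not_contains _ _ (by simpa using hcon)]
          have : ((tss.getD i []).getD (p0.getD i 0 + 1) "") ∉ g0.keys := by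
            intro hmem
            exact hcon ((PySem.Dict.contains_iff_mem_keys _ _).2 hmem)
          exact hk.append (List.nodup_singleton _)
            (fun a ha hb => this ((List.mem_singleton.1 hb) ▸ ha))
      · rw [if_neg hc]; exact hk
    · -- nonempty values are preserved
      intro hne
      apply c4
      intro t hcont
      rw [hg1] at hcont ⊢
      by_cases hc : p0.getD i 0 + 1 < (tss.getD i []).length
      · rw [if_pos hc] at hcont ⊢
        rw [PySem.Dict.contains_modify] at hcont
        by_cases ht : t = (tss.getD i []).getD (p0.getD i 0 + 1) ""
        · subst ht
          rw [PySem.Dict.getD_modify_self]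
          simp
        · rw [PySem.Dict.getD_modify_of_ne _ _ _ ht]
          apply hne
          rcases Bool.or_eq_true_iff.1 hcont with h | h
          · exact absurd (by simpa using h) ht
          · exact h
      · rw [if_neg hc] at hcont ⊢
        exact hne t hcont

-- counting a name over a mapped index list = counting the index (names are distinct)
lemma pvCountMap (fd : List (String × List String)) (hnd : (pvNames fd).Nodup)
    (l : List Nat) (hl : ∀ i ∈ l, i < fd.length) (j : Nat) (hj : j < fd.length) :
    (l.map (fun i => (pvNames fd).getD i "")).count ((pvNames fd).getD j "") = l.count j := by
  induction l with
  | nil => rfl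
  | cons i r ih =>
    have hi : i < fd.length := hl i (List.mem_cons_self ..)
    have ihr := ih (fun x hx => hl x (List.mem_cons_of_mem _ hx))
    by_cases hij : j = i
    · subst hij
      rw [List.map_cons, List.count_cons, List.count_cons, ihr]
      simp
    · have h1 : ((pvNames fd).getD i "" == (pvNames fd).getD j "") = false :=
        beq_false_of_ne (fun h => hij (pvNamesInj fd hnd j i hj hi h.symm))
      have h2 : (i == j) = false := beq_false_of_ne (fun h => hij h.symm)
      rw [List.map_cons, List.count_cons, List.count_cons, ihr, h1, h2]

-- the unique greedy choice: the transform of maximal pending count, least name on ties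
def pvIsBest (fd : List (String × List String)) (pos : List Nat) (t : String) : Prop :=
  (∃ i, i < fd.length ∧ pvHead? fd pos i = some t) ∧
  ∀ u, (∃ i, i < fd.length ∧ pvHead? fd pos i = some u) →
    ((pvIdx fd pos u).length : Int) < ((pvIdx fd pos t).length : Int) ∨
    (((pvIdx fd pos u).length : Int) = ((pvIdx fd pos t).length : Int) ∧ t ≤ u)

lemma pvIsBestUnique (fd : List (String × List String)) (pos : List Nat) (a b : String)
    (ha : pvIsBest fd pos a) (hb : pvIsBest fd pos b) : a = b := by
  rcases ha with ⟨haK, ha⟩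
  rcases hb with ⟨hbK, hb⟩
  have h1 := ha b hbK
  have h2 := hb a haK
  rcases h1 with h1 | ⟨h1e, h1le⟩
  · rcases h2 with h2 | ⟨h2e, _⟩
    · omega
    · omega
  · rcases h2 with h2 | ⟨_, h2le⟩
    · omega
    · exact le_antisymm h1le h2le

lemma pvLiveOfHead (fd : List (String × List String)) (pos : List Nat) (i : Nat) (t : String)
    (h : pvHead? fd pos i = some t) : pvLive fd pos i := by
  unfold pvHead? at h
  unfold pvLive
  obtain ⟨hlt, _⟩ := List.getElem?_eq_some_iff.1 h
  exact hlt

lemma pvHeadOfLive (fd : List (String × List String)) (pos : List Nat) (i : Nat)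
    (h : pvLive fd pos i) : ∃ t, pvHead? fd pos i = some t := by
  unfold pvLive at h
  exact ⟨_, List.getElem?_eq_getElem h⟩

-- lengths of the B-side group and the canonical index list agree
lemma pvLenEq (fd : List (String × List String)) (pos : List Nat)
    (groups : PySem.Dict String (List Nat)) (hB : pvInvB fd pos groups) (u : String) :
    (groups.getD u []).length = (pvIdx fd pos u).length := by
  apply List.Perm.length_eq
  rw [List.perm_ext_iff_of_nodup (hB.2.1 u) (pvP3 fd pos u)]
  intro i
  rw [hB.1 u i, pvP2]

-- A's best-transform scan picks the canonical best
lemma pvBestA (fd : List (String × List String)) (pos : List Nat)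
    (hne : ∃ i, i < fd.length ∧ pvLive fd pos i) :
    pvIsBest fd pos ((PySem.List.sorted ((pvPend fd pos).foldl (fun d p => d.modify p.1 [] (· ++ [p.2]))
        (PySem.Dict.empty : PySem.Dict String (List Nat))).keys id).foldl
      (fun (bm : String × Int) t =>
        if ((((pvPend fd pos).foldl (fun d p => d.modify p.1 [] (· ++ [p.2]))
            (PySem.Dict.empty : PySem.Dict String (List Nat))).getD t []).length : Int) > bm.2
        then (t, ((((pvPend fd pos).foldl (fun d p => d.modify p.1 [] (· ++ [p.2]))
            (PySem.Dict.empty : PySem.Dict String (List Nat))).getD t []).length : Int))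
        else bm) ("", -1)).1 := by
  set P := (pvPend fd pos).foldl (fun d p => d.modify p.1 [] (· ++ [p.2]))
      (PySem.Dict.empty : PySem.Dict String (List Nat)) with hP
  have hmemS : ∀ t, t ∈ PySem.List.sorted P.keys id ↔ ∃ i, i < fd.length ∧ pvHead? fd pos i = some t := by
    intro t
    rw [List.Perm.mem_iff (PySem.List.sorted_perm P.keys id false), hP, pvPendDictKeys,
      PySem.Set.mem_ofList, pvP4]
  have hSnodup : (PySem.List.sorted P.keys id).Nodup := by
    rw [List.Perm.nodup_iff (PySem.List.sorted_perm P.keys id false), hP, pvPendDictKeys]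
    exact PySem.Set.nodup_ofList _
  have hpw : List.Pairwise (· < ·) (PySem.List.sorted P.keys id) := by
    have h1 := PySem.List.sorted_pairwise P.keys (id : String → String)
    have h2 : List.Pairwise (fun a b : String => a ≤ b ∧ a ≠ b) (PySem.List.sorted P.keys id) :=
      List.pairwise_and_iff.2 ⟨h1, hSnodup⟩
    exact h2.imp (fun h => lt_of_le_of_ne h.1 h.2)
  have hSne : PySem.List.sorted P.keys id ≠ [] := by
    obtain ⟨i0, hi0, hl0⟩ := hne
    obtain ⟨t0, ht0⟩ := pvHeadOfLive fd pos i0 hl0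
    exact List.ne_nil_of_mem ((hmemS t0).2 ⟨i0, hi0, ht0⟩)
  obtain ⟨s0, srest, hS⟩ := List.exists_cons_of_ne_nil hSne
  rw [hS]
  have hinit : ((s0 :: srest).foldl (fun (bm : String × Int) t =>
      if (((P.getD t []).length : Int) > bm.2)
      then (t, ((P.getD t []).length : Int)) else bm) ("", -1))
      = srest.foldl (fun (bm : String × Int) t =>
        if (((P.getD t []).length : Int) > bm.2)
        then (t, ((P.getD t []).length : Int)) else bm) (s0, ((P.getD s0 []).length : Int)) := by
    have : (((P.getD s0 []).length : Int) > (-1 : Int)) := by omega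
    simp only [List.foldl_cons, this, if_pos]
  rw [hinit]
  have hpw' : List.Pairwise (· < ·) (s0 :: srest) := hS ▸ hpw
  obtain ⟨e1, e2, e3⟩ := pvFoldArgmax (fun t => ((P.getD t []).length : Int)) srest s0 hpw'
  have hcnt : ∀ t, ((P.getD t []).length : Int) = ((pvIdx fd pos t).length : Int) := by
    intro t
    rw [hP, pvPendDictGetD]
  constructor
  · rw [← hmemS _, hS]
    exact e2
  · intro u hu
    have huS : u ∈ s0 :: srest := by rw [← hS, hmemS]; exact hu
    rcases e3 u huS with h | ⟨he, hle⟩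
    · left
      rw [← hcnt u, ← hcnt _]
      exact h
    · right
      rw [← hcnt u, ← hcnt _]
      exact ⟨he, hle⟩

-- B's min over the group map picks the canonical best and returns that group
lemma pvBestB (fd : List (String × List String)) (pos : List Nat)
    (groups : PySem.Dict String (List Nat)) (hB : pvInvB fd pos groups)
    (hne : ∃ i, i < fd.length ∧ pvLive fd pos i) :
    pvIsBest fd pos (pyBMin groups.items).1 ∧
    (pyBMin groups.items).2 = groups.getD (pyBMin groups.items).1 [] := by
  have hitemsne : groups.items ≠ [] := by
    obtain ⟨i0, hi0, hl0⟩ := hne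
    obtain ⟨t0, ht0⟩ := pvHeadOfLive fd pos i0 hl0
    have hmem : i0 ∈ groups.getD t0 [] := (hB.1 t0 i0).2 ⟨hi0, ht0⟩
    intro hempty
    have : groups.getD t0 [] = [] := by
      show ((List.find? _ groups.items).map _).getD [] = []
      rw [hempty]
      rfl
    rw [this] at hmem
    exact List.not_mem_nil hmem
  obtain ⟨x, xs, hitems⟩ := List.exists_cons_of_ne_nil hitemsne
  have hfold : pyBMin groups.items = xs.foldl (fun b y =>
      if (toLex (-(y.2.length : Int), y.1)) < (toLex (-(b.2.length : Int), b.1)) then y else b) x := by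
    simp only [hitems, pyBMin]
    apply PySem.List.foldl_congr_mem
    intro acc y _
    apply if_congr _ rfl rfl
    rw [Prod.Lex.lt_iff]
    constructor
    · rintro (h | ⟨h1, h2⟩)
      · left; simp; omega
      · right
        refine ⟨by simp; omega, h2⟩
    · rintro (h | ⟨h1, h2⟩)
      · left; simp at h; omega
      · right
        refine ⟨by simp at h1; omega, h2⟩
  obtain ⟨hrmem, hrmin⟩ := pvFoldMin (fun (p : String × List Nat) => toLex (-(p.2.length : Int), p.1)) xs x
  rw [← hitems] at hrmem hrmin
  rw [hfold] at *
  set r := xs.foldl (fun b y =>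
      if (toLex (-(y.2.length : Int), y.1)) < (toLex (-(b.2.length : Int), b.1)) then y else b) x with hr
  have hrget : groups.getD r.1 [] = r.2 := by
    have : (r.1, r.2) ∈ groups.items := by simpa using hrmem
    have hg := PySem.Dict.get?_of_mem_items _ this hB.2.2.2
    simp [PySem.Dict.getD, hg]
  refine ⟨⟨?_, ?_⟩, hrget.symm⟩
  · -- r.1 is a pending transform
    have hcontains : groups.contains r.1 = true := by
      rw [PySem.Dict.contains_iff_mem_keys]
      show r.1 ∈ groups.items.map (·.1)
      exact List.mem_map.2 ⟨r, hrmem, rfl⟩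
    have hneval := hB.2.2.1 r.1 hcontains
    obtain ⟨i, hi⟩ := List.exists_mem_of_ne_nil _ hneval
    exact ⟨i, (hB.1 r.1 i).1 hi⟩
  · -- minimality over all pending transforms
    intro u hu
    obtain ⟨i, hi, hhead⟩ := hu
    have hmemu : i ∈ groups.getD u [] := (hB.1 u i).2 ⟨hi, hhead⟩
    have hneu : groups.getD u [] ≠ [] := List.ne_nil_of_mem hmemu
    have hcontainsu : groups.contains u = true := by
      by_contra hc
      rw [PySem.Dict.getD_of_not_contains _ _ (Bool.not_eq_true _ ▸ Bool.of_not_eq_true hc)] at hneu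
      exact hneu rfl
    obtain ⟨p, hpmem, hpu⟩ := List.mem_map.1 ((PySem.Dict.contains_iff_mem_keys _ _).1 hcontainsu)
    have hpget : groups.getD p.1 [] = p.2 := by
      have hg := PySem.Dict.get?_of_mem_items _ (show (p.1, p.2) ∈ groups.items by simpa using hpmem) hB.2.2.2
      simp [PySem.Dict.getD, hg]
    have hkey := hrmin p hpmem
    rw [Prod.Lex.lt_iff] at hkey
    have h1 : ¬(-(p.2.length : Int) < -(r.2.length : Int)) := fun h => hkey (Or.inl h)
    have h2 : -(p.2.length : Int) = -(r.2.length : Int) → ¬ p.1 < r.1 :=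
      fun he hl => hkey (Or.inr ⟨he, hl⟩)
    have hrlen : r.2.length = (pvIdx fd pos r.1).length := by
      rw [← hrget]; exact pvLenEq fd pos groups hB r.1
    have hplen : p.2.length = (pvIdx fd pos p.1).length := by
      rw [← hpget]; exact pvLenEq fd pos groups hB p.1
    subst hpu
    by_cases hlt : p.2.length < r.2.length
    · left
      rw [← hplen, ← hrlen]
      exact_mod_cast hlt
    · have heq : p.2.length = r.2.length := by omega
      right
      constructor
      · rw [← hplen, ← hrlen]
        exact_mod_cast heq
      · exact not_lt.1 (h2 (by exact_mod_cast congrArg (fun x : Nat => -(x : Int)) heq))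

-- equal masks from membership-equal index lists
lemma pvMaskEq (n : Nat) (L1 L2 : List Nat) (hmem : ∀ j, j ∈ L1 ↔ j ∈ L2) :
    L1.foldl (fun m i => m.set i 1) (List.replicate n (0 : Int))
      = L2.foldl (fun m i => m.set i 1) (List.replicate n (0 : Int)) := by
  apply List.ext_getElem
  · rw [pvScatterLen, pvScatterLen]
  · intro j h1 h2
    have hn : j < n := by
      have := h1
      rw [pvScatterLen, List.length_replicate] at this
      exact this
    have e1 := pvScatterGetD L1 (List.replicate n (0 : Int)) j
    have e2 := pvScatterGetD L2 (List.replicate n (0 : Int)) j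
    rw [List.getD_eq_getElem _ _ h1] at e1
    rw [List.getD_eq_getElem _ _ h2] at e2
    rw [e1, e2]
    simp [hmem j]

-- A's index bumps seen through the name dictionary
lemma pvCurStep (fd : List (String × List String)) (hnd : (pvNames fd).Nodup)
    (cur : PySem.Dict String Nat) (L : List Nat) (hL : ∀ i ∈ L, i < fd.length)
    (j : Nat) (hj : j < fd.length) :
    (L.foldl (fun c i => c.modify ((pvNames fd).getD i "") 0 (· + 1)) cur).getD
        ((pvNames fd).getD j "") 0
      = cur.getD ((pvNames fd).getD j "") 0 + L.count j := by
  have h1 : L.foldl (fun c i => c.modify ((pvNames fd).getD i "") 0 (· + 1)) cur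
      = (L.map (fun i => (pvNames fd).getD i "")).foldl (fun c k => c.modify k 0 (· + 1)) cur := by
    rw [List.foldl_map]
  rw [h1, PySem.Dict.getD_foldl_modify_add_one_nat, pvCountMap fd hnd L hL j hj]

-- one A step preserves the A-side invariant
lemma pvInvAStep (fd : List (String × List String)) (hnd : (pvNames fd).Nodup)
    (pos : List Nat) (cur : PySem.Dict String Nat) (active : PySem.Set String)
    (hA : pvInvA fd pos cur active) (best : String) (L : List Nat) (hLnd : L.Nodup)
    (hmemL : ∀ i, i ∈ L ↔ i < fd.length ∧ pvHead? fd pos i = some best)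
    (pos' : List Nat)
    (hpos' : ∀ j, pos'.getD j 0 = if j ∈ L then pos.getD j 0 + 1 else pos.getD j 0)
    (ntot : PySem.Dict String Nat)
    (hnt : ∀ i, i < fd.length → ntot.getD ((pvNames fd).getD i "") 0 = ((pvTss fd).getD i []).length) :
    pvInvA fd pos'
      (L.foldl (fun c i => c.modify ((pvNames fd).getD i "") 0 (· + 1)) cur)
      (PySem.Set.diff active
        ((L.map (fun i => (pvNames fd).getD i "")).foldl (fun r f =>
          if decide (ntot.getD f 0 ≤ (L.foldl (fun c i => c.modify ((pvNames fd).getD i "") 0 (· + 1)) cur).getD f 0)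
          then PySem.Set.add r f else r) PySem.Set.empty)) := by
  have hL : ∀ i ∈ L, i < fd.length := fun i hi => ((hmemL i).1 hi).1
  set cur' := L.foldl (fun c i => c.modify ((pvNames fd).getD i "") 0 (· + 1)) cur with hcur'
  have hcurget : ∀ j, j < fd.length →
      cur'.getD ((pvNames fd).getD j "") 0 = pos'.getD j 0 := by
    intro j hj
    rw [hcur', pvCurStep fd hnd cur L hL j hj, hA.1 j hj, hpos' j]
    by_cases hjL : j ∈ L
    · rw [if_pos hjL, List.count_eq_one_of_mem hLnd hjL]
    · rw [if_neg hjL, List.count_eq_zero.2 hjL]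
      omega
  have hnotmap : ∀ j, j < fd.length → j ∉ L →
      ((pvNames fd).getD j "") ∉ L.map (fun i => (pvNames fd).getD i "") := by
    intro j hj hjL hmem
    obtain ⟨k, hk, he⟩ := List.mem_map.1 hmem
    exact hjL ((pvNamesInj fd hnd k j (hL k hk) hj he) ▸ hk)
  refine ⟨hcurget, ?_⟩
  intro s
  rw [PySem.Set.mem_diff, pvFoldAddMem]
  constructor
  · rintro ⟨hmem, hrem⟩
    obtain ⟨i, hi, rfl, hlive⟩ := (hA.2 _).1 hmem
    refine ⟨i, hi, rfl, ?_⟩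
    unfold pvLive
    rw [hpos' i]
    by_cases hiL : i ∈ L
    · rw [if_pos hiL]
      have hin : ((pvNames fd).getD i "") ∈ L.map (fun i => (pvNames fd).getD i "") :=
        List.mem_map.2 ⟨i, hiL, rfl⟩
      have hcond : ¬ (ntot.getD ((pvNames fd).getD i "") 0 ≤ cur'.getD ((pvNames fd).getD i "") 0) := by
        intro hle
        exact hrem (Or.inr ⟨hin, by simpa using hle⟩)
      rw [hnt i hi, hcurget i hi, hpos' i, if_pos hiL] at hcond
      omega
    · rw [if_neg hiL]
      exact hlive
  · rintro ⟨i, hi, rfl, hlive'⟩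
    unfold pvLive at hlive'
    rw [hpos' i] at hlive'
    by_cases hiL : i ∈ L
    · rw [if_pos hiL] at hlive'
      have hlive : pvLive fd pos i := by
        unfold pvLive; omega
      refine ⟨(hA.2 _).2 ⟨i, hi, rfl, hlive⟩, ?_⟩
      rintro (h | ⟨_, hcond⟩)
      · exact absurd h (by simp [PySem.Set.empty])
      · rw [decide_eq_true_iff, hnt i hi, hcurget i hi, hpos' i, if_pos hiL] at hcond
        omega
    · rw [if_neg hiL] at hlive'
      refine ⟨(hA.2 _).2 ⟨i, hi, rfl, hlive'⟩, ?_⟩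
      rintro (h | ⟨hin, _⟩)
      · exact absurd h (by simp [PySem.Set.empty])
      · exact hnotmap i hi hiL hin

-- one B step preserves the B-side invariant
lemma pvInvBStep (fd : List (String × List String)) (pos : List Nat)
    (groups : PySem.Dict String (List Nat)) (hlen : pos.length = fd.length)
    (hB : pvInvB fd pos groups) (best : String) :
    ((groups.getD best []).foldl (fun (s : List Nat × PySem.Dict String (List Nat)) i =>
        (s.1.set i (s.1.getD i 0 + 1),
         if s.1.getD i 0 + 1 < ((pvTss fd).getD i []).length
         then s.2.modify (((pvTss fd).getD i []).getD (s.1.getD i 0 + 1) "") [] (· ++ [i])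
         else s.2)) (pos, groups.erase best)).1.length = pos.length ∧
    (∀ j, ((groups.getD best []).foldl (fun (s : List Nat × PySem.Dict String (List Nat)) i =>
        (s.1.set i (s.1.getD i 0 + 1),
         if s.1.getD i 0 + 1 < ((pvTss fd).getD i []).length
         then s.2.modify (((pvTss fd).getD i []).getD (s.1.getD i 0 + 1) "") [] (· ++ [i])
         else s.2)) (pos, groups.erase best)).1.getD j 0
      = if j ∈ groups.getD best [] then pos.getD j 0 + 1 else pos.getD j 0) ∧
    pvInvB fd
      ((groups.getD best []).foldl (fun (s : List Nat × PySem.Dict String (List Nat)) i =>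
        (s.1.set i (s.1.getD i 0 + 1),
         if s.1.getD i 0 + 1 < ((pvTss fd).getD i []).length
         then s.2.modify (((pvTss fd).getD i []).getD (s.1.getD i 0 + 1) "") [] (· ++ [i])
         else s.2)) (pos, groups.erase best)).1
      ((groups.getD best []).foldl (fun (s : List Nat × PySem.Dict String (List Nat)) i =>
        (s.1.set i (s.1.getD i 0 + 1),
         if s.1.getD i 0 + 1 < ((pvTss fd).getD i []).length
         then s.2.modify (((pvTss fd).getD i []).getD (s.1.getD i 0 + 1) "") [] (· ++ [i])
         else s.2)) (pos, groups.erase best)).2 := by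
  set L := groups.getD best [] with hLdef
  have hLnd : L.Nodup := hB.2.1 best
  have hLmem : ∀ i, i ∈ L ↔ i < fd.length ∧ pvHead? fd pos i = some best := hB.1 best
  have hLlt : ∀ i ∈ L, i < pos.length := by
    intro i hi
    rw [hlen]
    exact ((hLmem i).1 hi).1
  obtain ⟨c0, c1, c2, c3, c4⟩ := pvBInnerPG (pvTss fd) L pos (groups.erase best) hLnd hLlt
  have hposd : ∀ i ∈ L, pos.getD i 0 = pos.getD i 0 := fun _ _ => rfl
  refine ⟨c0, c1, ?_, ?_, ?_, ?_⟩
  · -- membership characterization at the new pos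
    intro t i
    rw [c2 t, List.mem_append, pvGetDErase, List.mem_filter]
    have hhead' : pvHead? fd ((L.foldl (fun (s : List Nat × PySem.Dict String (List Nat)) i =>
        (s.1.set i (s.1.getD i 0 + 1),
         if s.1.getD i 0 + 1 < ((pvTss fd).getD i []).length
         then s.2.modify (((pvTss fd).getD i []).getD (s.1.getD i 0 + 1) "") [] (· ++ [i])
         else s.2)) (pos, groups.erase best)).1) i
        = if i ∈ L then ((pvTss fd).getD i [])[pos.getD i 0 + 1]?
          else pvHead? fd pos i := by
      unfold pvHead?
      rw [c1 i]
      by_cases hiL : i ∈ L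
      · rw [if_pos hiL, if_pos hiL]
      · rw [if_neg hiL, if_neg hiL]
    rw [hhead']
    by_cases hiL : i ∈ L
    · rw [if_pos hiL]
      constructor
      · rintro (h1 | ⟨h2a, h2⟩)
        · -- i cannot be in an untouched group: its old head was best
          exfalso
          rcases em (t = best) with rfl | hne
          · simp at h1
          · rw [if_neg hne] at h1
            have := ((hB.1 t i).1 h1).2
            have h2 := ((hLmem i).1 hiL).2
            rw [this] at h2
            exact hne (Option.some.inj h2)
        · exact ⟨((hLmem i).1 hiL).1, by simpa using h2⟩
      · rintro ⟨hi, hh⟩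
        right
        exact ⟨hiL, by simpa using hh⟩
    · rw [if_neg hiL]
      constructor
      · rintro (h1 | ⟨h2, h2b⟩)
        · rcases em (t = best) with rfl | hne
          · simp at h1
          · rw [if_neg hne] at h1
            exact (hB.1 t i).1 h1
        · exact absurd h2 hiL
      · rintro ⟨hi, hh⟩
        left
        have hmem := (hB.1 t i).2 ⟨hi, hh⟩
        rcases em (t = best) with rfl | hne
        · exact absurd hmem (by rw [hLdef] at hiL; exact hiL)
        · rw [if_neg hne]
          exact hmem
  · -- values stay Nodup
    intro t
    rw [c2 t]
    apply List.Nodup.append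
    · rw [pvGetDErase]
      rcases em (t = best) with rfl | hne
      · simp
      · rw [if_neg hne]
        exact hB.2.1 t
    · exact hLnd.filter _
    · intro a ha hb
      have haL : a ∈ L := List.mem_of_mem_filter hb
      rw [pvGetDErase] at ha
      rcases em (t = best) with rfl | hne
      · simp at ha
      · rw [if_neg hne] at ha
        have h1 := ((hB.1 t a).1 ha).2
        have h2 := ((hLmem a).1 haL).2
        rw [h1] at h2
        exact hne (Option.some.inj h2)
  · -- nonempty values
    apply c4
    intro t hcont
    rw [pvContainsErase] at hcont
    rcases em (t = best) with rfl | hne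
    · rw [if_pos rfl] at hcont
      exact absurd hcont (by simp)
    · rw [if_neg hne] at hcont
      rw [pvGetDErase, if_neg hne]
      exact hB.2.2.1 t hcont
  · -- keys stay Nodup
    apply c3
    rw [pvKeysErase]
    exact hB.2.2.2.filter _

-- emptiness of the two loop conditions coincides
lemma pvEmptyA (fd : List (String × List String)) (pos : List Nat)
    (cur : PySem.Dict String Nat) (active : PySem.Set String) (hA : pvInvA fd pos cur active)
    (hact : active = []) (groups : PySem.Dict String (List Nat)) (hB : pvInvB fd pos groups) :
    groups.items = [] := by
  by_contra hne
  obtain ⟨p, rest, hitems⟩ := List.exists_cons_of_ne_nil hne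
  have hcont : groups.contains p.1 = true := by
    show groups.items.any (fun q => q.1 == p.1) = true
    rw [hitems]
    simp
  obtain ⟨i, hi⟩ := List.exists_mem_of_ne_nil _ (hB.2.2.1 p.1 hcont)
  obtain ⟨hilt, hhead⟩ := (hB.1 p.1 i).1 hi
  have : ((pvNames fd).getD i "") ∈ active :=
    (hA.2 _).2 ⟨i, hilt, rfl, pvLiveOfHead fd pos i p.1 hhead⟩
  rw [hact] at this
  exact List.not_mem_nil this

lemma pvLiveOfActive (fd : List (String × List String)) (pos : List Nat)
    (cur : PySem.Dict String Nat) (active : PySem.Set String) (hA : pvInvA fd pos cur active)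
    (hact : active ≠ []) : ∃ i, i < fd.length ∧ pvLive fd pos i := by
  obtain ⟨s, hs⟩ := List.exists_mem_of_ne_nil _ hact
  obtain ⟨i, hi, _, hlive⟩ := (hA.2 s).1 hs
  exact ⟨i, hi, hlive⟩

-- the main bisimulation: A's loop and B's loop produce the same output in lockstep
lemma pvBisim (fd : List (String × List String)) (hnd : (pvNames fd).Nodup)
    (ntot : PySem.Dict String Nat)
    (hnt : ∀ i, i < fd.length → ntot.getD ((pvNames fd).getD i "") 0 = ((pvTss fd).getD i []).length) :
    ∀ (fuel : Nat) (pos : List Nat) (cur : PySem.Dict String Nat) (active : PySem.Set String)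
      (groups : PySem.Dict String (List Nat)) (out : List (List (String × List Int))),
      pos.length = fd.length → pvInvA fd pos cur active → pvInvB fd pos groups →
      pyALoop (PySem.Dict.mk fd) (pvNames fd) fd.length ntot fuel cur active out
        = pyBLoop (pvTss fd) fd.length fuel pos groups out := by
  intro fuel
  induction fuel with
  | zero => intro pos cur active groups out _ _ _; rfl
  | succ fuel ih =>
    intro pos cur active groups out hlen hA hB
    rw [pyALoop, pyBLoop]
    by_cases hact : active = []
    · rw [if_pos hact, if_pos (pvEmptyA fd pos cur active hA hact groups hB)]
    · have hne := pvLiveOfActive fd pos cur active hA hact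
      have hitemsne : groups.items ≠ [] := by
        obtain ⟨i0, hi0, hl0⟩ := hne
        obtain ⟨t0, ht0⟩ := pvHeadOfLive fd pos i0 hl0
        have hmem : i0 ∈ groups.getD t0 [] := (hB.1 t0 i0).2 ⟨hi0, ht0⟩
        intro hempty
        have : groups.getD t0 [] = [] := by
          show ((List.find? _ groups.items).map _).getD [] = []
          rw [hempty]
          rfl
        rw [this] at hmem
        exact List.not_mem_nil hmem
      rw [if_neg hact, if_neg hitemsne]
      -- A's pending dict is the canonical one
      rw [pvPendingAEq fd hnd pos cur active ntot hnt hA]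
      set P := (pvPend fd pos).foldl (fun d p => d.modify p.1 [] (· ++ [p.2]))
          (PySem.Dict.empty : PySem.Dict String (List Nat)) with hP
      have hPempty : ¬ P.items = [] := by
        obtain ⟨i0, hi0, hl0⟩ := hne
        obtain ⟨t0, ht0⟩ := pvHeadOfLive fd pos i0 hl0
        intro hempty
        have hkeys : P.keys = [] := by
          show P.items.map (·.1) = []
          rw [hempty]; rfl
        have : t0 ∈ P.keys := by
          rw [hP, pvPendDictKeys, PySem.Set.mem_ofList, pvP4]
          exact ⟨i0, hi0, ht0⟩
        rw [hkeys] at this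
        exact List.not_mem_nil this
      rw [if_neg hPempty]
      dsimp only
      obtain ⟨hbestB, hidxsB⟩ := pvBestB fd pos groups hB hne
      have hbestA := pvBestA fd pos hne
      rw [← hP] at hbestA
      set bA := ((PySem.List.sorted P.keys id).foldl (fun (bm : String × Int) t =>
          if ((P.getD t []).length : Int) > bm.2 then (t, ((P.getD t []).length : Int)) else bm)
          ("", -1)).1 with hbAdef
      have hbeq : bA = (pyBMin groups.items).1 := pvIsBestUnique fd pos _ _ hbestA hbestB
      rw [← hbeq] at hidxsB
      rw [← hbeq, hidxsB]
      have hidxA : P.getD bA [] = pvIdx fd pos bA := by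
        rw [hP]
        exact pvPendDictGetD fd pos bA
      rw [hidxA]
      have hmem : ∀ j, j ∈ pvIdx fd pos bA ↔ j ∈ groups.getD bA [] := by
        intro j
        rw [pvP2, hB.1]
      -- split A's three-component fold
      rw [PySem.List.foldl_prod_mk (f := fun (m : List Int) (i : Nat) => m.set i 1)
        (g := fun (s : List String × PySem.Dict String Nat) (i : Nat) =>
          (s.1 ++ [(pvNames fd).getD i ""], s.2.modify ((pvNames fd).getD i "") 0 (· + 1)))]
      rw [PySem.List.foldl_prod_mk (f := fun (s : List String) (i : Nat) => s ++ [(pvNames fd).getD i ""])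
        (g := fun (c : PySem.Dict String Nat) (i : Nat) => c.modify ((pvNames fd).getD i "") 0 (· + 1))]
      -- split B's two-component fold
      rw [PySem.List.foldl_prod_mk (f := fun (m : List Int) (i : Nat) => m.set i 1)
        (g := fun (s : List Nat × PySem.Dict String (List Nat)) (i : Nat) =>
          (s.1.set i (s.1.getD i 0 + 1),
           if s.1.getD i 0 + 1 < ((pvTss fd).getD i []).length
           then s.2.modify (((pvTss fd).getD i []).getD (s.1.getD i 0 + 1) "") [] (· ++ [i])
           else s.2))]
      dsimp only
      rw [pvFoldlAppendEqMap, List.nil_append]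
      have hmask := pvMaskEq fd.length (pvIdx fd pos bA) (groups.getD bA []) hmem
      rw [hmask]
      obtain ⟨c0, c1, hBnew⟩ := pvInvBStep fd pos groups hlen hB bA
      have hlen' : ((groups.getD bA []).foldl (fun (s : List Nat × PySem.Dict String (List Nat)) i =>
          (s.1.set i (s.1.getD i 0 + 1),
           if s.1.getD i 0 + 1 < ((pvTss fd).getD i []).length
           then s.2.modify (((pvTss fd).getD i []).getD (s.1.getD i 0 + 1) "") [] (· ++ [i])
           else s.2)) (pos, groups.erase bA)).1.length = fd.length := by
        rw [c0, hlen]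
      have hposN : ∀ j, ((groups.getD bA []).foldl (fun (s : List Nat × PySem.Dict String (List Nat)) i =>
          (s.1.set i (s.1.getD i 0 + 1),
           if s.1.getD i 0 + 1 < ((pvTss fd).getD i []).length
           then s.2.modify (((pvTss fd).getD i []).getD (s.1.getD i 0 + 1) "") [] (· ++ [i])
           else s.2)) (pos, groups.erase bA)).1.getD j 0
          = if j ∈ pvIdx fd pos bA then pos.getD j 0 + 1 else pos.getD j 0 := by
        intro j
        rw [c1 j]
        by_cases hj : j ∈ pvIdx fd pos bA
        · rw [if_pos ((hmem j).1 hj), if_pos hj]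
        · rw [if_neg (fun h => hj ((hmem j).2 h)), if_neg hj]
      have hA' := pvInvAStep fd hnd pos cur active hA bA (pvIdx fd pos bA) (pvP3 fd pos bA)
        (fun i => pvP2 fd pos bA i) _ hposN ntot hnt
      exact ih _ _ _ _ _ hlen' hA' hBnew

-- initial-state facts
lemma pvNtotInit (fd : List (String × List String)) (hnd : (pvNames fd).Nodup) :
    ∀ i, i < fd.length →
      (fd.foldl (fun d p => d.insert p.1 p.2.length) PySem.Dict.empty).getD
          ((pvNames fd).getD i "") 0
        = ((pvTss fd).getD i []).length := by
  intro i hi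
  have hitems : (fd.foldl (fun d p => d.insert p.1 p.2.length)
      (PySem.Dict.empty : PySem.Dict String Nat)).items
      = fd.map (fun p => (p.1, p.2.length)) := by
    have := PySem.Dict.items_foldl_insert_fresh fd (fun p => p.1) (fun p => p.2.length)
      (PySem.Dict.empty : PySem.Dict String Nat) (fun a _ => PySem.Dict.contains_empty _)
      (by exact hnd)
    simpa using this
  have hkeys : (fd.foldl (fun d p => d.insert p.1 p.2.length)
      (PySem.Dict.empty : PySem.Dict String Nat)).keys.Nodup := by
    show ((fd.foldl (fun d p => d.insert p.1 p.2.length)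
      (PySem.Dict.empty : PySem.Dict String Nat)).items.map (·.1)).Nodup
    rw [hitems]
    simpa [List.map_map] using hnd
  have hni : i < (pvNames fd).length := by simpa [pvNames] using hi
  have hti : i < (pvTss fd).length := by simpa [pvTss] using hi
  rw [List.getD_eq_getElem _ _ hni, List.getD_eq_getElem _ _ hti]
  have hmem : ((pvNames fd)[i], ((pvTss fd)[i]).length) ∈ (fd.foldl (fun d p => d.insert p.1 p.2.length)
      (PySem.Dict.empty : PySem.Dict String Nat)).items := by
    rw [hitems]
    have : (fun p : String × List String => (p.1, p.2.length)) fd[i]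
        = ((pvNames fd)[i], ((pvTss fd)[i]).length) := by
      simp [pvNames, pvTss, List.getElem_map]
    rw [← this]
    exact List.mem_map.2 ⟨fd[i], List.getElem_mem _, rfl⟩
  have := PySem.Dict.get?_of_mem_items _ hmem hkeys
  simp [PySem.Dict.getD, this]

lemma pvCurInit (l : List String) (s : String) :
    ((l.foldl (fun d f => d.insert f 0) (PySem.Dict.empty : PySem.Dict String Nat))).getD s 0 = 0 := by
  have : ∀ d : PySem.Dict String Nat, (∀ u, d.getD u 0 = 0) →
      ∀ u, (l.foldl (fun d f => d.insert f 0) d).getD u 0 = 0 := by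
    induction l with
    | nil => intro d h u; exact h u
    | cons x t ih =>
      intro d h u
      apply ih
      intro v
      rw [PySem.Dict.getD_insert]
      split <;> [rfl; exact h v]
  exact this PySem.Dict.empty (fun u => PySem.Dict.getD_empty _ _) s

lemma pvInvAInit (fd : List (String × List String)) (hnd : (pvNames fd).Nodup)
    (ntot : PySem.Dict String Nat)
    (hnt : ∀ i, i < fd.length → ntot.getD ((pvNames fd).getD i "") 0 = ((pvTss fd).getD i []).length) :
    pvInvA fd (List.replicate fd.length 0)
      ((pvNames fd).foldl (fun d f => d.insert f 0) PySem.Dict.empty)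
      ((pvNames fd).foldl (fun s f =>
        if decide (0 < ntot.getD f 0) then PySem.Set.add s f else s) PySem.Set.empty) := by
  have hrep : ∀ i : Nat, (List.replicate fd.length (0 : Nat)).getD i 0 = 0 := by
    intro i
    rw [List.getD_eq_getElem?_getD, List.getElem?_replicate]
    split <;> simp
  constructor
  · intro i hi
    rw [pvCurInit, hrep]
  · intro s
    rw [pvFoldAddMem]
    constructor
    · rintro (h | ⟨hmem, hc⟩)
      · exact absurd h (by simp [PySem.Set.empty])
      · obtain ⟨i, hi, he⟩ := List.getElem_of_mem hmem
        have hin : i < fd.length := by simpa [pvNames] using hi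
        refine ⟨i, hin, by rw [List.getD_eq_getElem _ _ hi, he], ?_⟩
        unfold pvLive
        rw [hrep]
        have := hnt i hin
        rw [List.getD_eq_getElem _ _ hi, he] at this
        rw [decide_eq_true_iff] at hc
        rw [this] at hc
        exact hc
    · rintro ⟨i, hi, rfl, hlive⟩
      right
      have hni : i < (pvNames fd).length := by simpa [pvNames] using hi
      refine ⟨by rw [List.getD_eq_getElem _ _ hni]; exact List.getElem_mem _, ?_⟩
      rw [decide_eq_true_iff, hnt i hi]
      unfold pvLive at hlive
      rw [hrep] at hlive
      omega

-- ===== VERDICT (by name: the statement is the Claim_ definition above) =====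
theorem get_raw_optimized_scaler_sequence_py_spec : Claim_equal_get_raw_optimized_scaler_sequence_py := by
  intro fd _ hpre
  show get_raw_optimized_scaler_sequence_py fd = get_raw_optimized_scaler_sequence_py_alt fd
  have hnd : (pvNames fd).Nodup := hpre
  unfold get_raw_optimized_scaler_sequence_py get_raw_optimized_scaler_sequence_py_alt
  dsimp only
  have hkeys : (PySem.Dict.mk fd).keys = pvNames fd := rfl
  have htss : fd.map (·.2) = pvTss fd := rfl
  rw [hkeys, htss]
  have hn1 : (pvNames fd).length = fd.length := by simp [pvNames]
  have hn2 : (pvTss fd).length = fd.length := by simp [pvTss]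
  rw [pvGroupsInitEq fd]
  rw [hn1, hn2]
  have hfuel : (pvTss fd).foldl (fun a t => a + t.length) 0
      = fd.foldl (fun a p => a + p.2.length) 0 := by
    show (fd.map (·.2)).foldl (fun a t => a + t.length) 0 = _
    rw [List.foldl_map]
  rw [hfuel]
  exact pvBisim fd hnd _ (pvNtotInit fd hnd) _ _ _ _ _ _
    (by simp) (pvInvAInit fd hnd _ (pvNtotInit fd hnd))
    (pvInvBOfPendDict fd (List.replicate fd.length 0))
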